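-- pv_equiv track=rewrite | github.com/Aurora-AI/Aurora-HRMWrapper | aurora_hrm/wrapper.py | _generate_sample_path
-- ===== SOURCE A (Python) =====
-- from typing import Dict, Any, List, Optional, Tuple
--
-- def _generate_sample_path(maze: List[List[int]], start: Tuple[int, int],
--                          end: Tuple[int, int]) -> List[Tuple[int, int]]:
--     '''Gera um caminho de exemplo para demonstração'''
--     # Implementação placeholder - linha reta quando possível
--     path = [start]
--     current = start
--
--     while current != end:
--         # Mover em direção ao objetivo (implementação simplificada)
--         next_x = current[0] + (1 if end[0] > current[0] else -1 if end[0] < current[0] else 0)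
--         next_y = current[1] + (1 if end[1] > current[1] else -1 if end[1] < current[1] else 0)
--
--         current = (next_x, next_y)
--         path.append(current)
--
--         # Evitar loop infinito
--         if len(path) > 100:
--             break
--
--     return path
-- ===== SOURCE B (Python) =====
-- def _generate_sample_path(maze, start, end):
--     """Closed-form straight-line path: position at step i is start shifted by
--     sign * min(i, axis distance) on each axis, i = 0..min(max distance, 100)."""
--     dx = end[0] - start[0]
--     dy = end[1] - start[1]
--     sx = (dx > 0) - (dx < 0)
--     sy = (dy > 0) - (dy < 0)
--     n = min(max(abs(dx), abs(dy)), 100)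
--     return [(start[0] + sx * min(i, abs(dx)), start[1] + sy * min(i, abs(dy)))
--             for i in range(n + 1)]
-- ===== Notes on version B (the rewrite author's own statement) =====
-- stated objective: alternative
-- what changed: Replaced the stateful while loop maintaining `current` (with a length>100 break) by a closed-form index formula: step count n=min(max(|dx|,|dy|),100) and position i is start + sign*min(i,|axis distance|), built with one list comprehension.
import Mathlib
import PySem

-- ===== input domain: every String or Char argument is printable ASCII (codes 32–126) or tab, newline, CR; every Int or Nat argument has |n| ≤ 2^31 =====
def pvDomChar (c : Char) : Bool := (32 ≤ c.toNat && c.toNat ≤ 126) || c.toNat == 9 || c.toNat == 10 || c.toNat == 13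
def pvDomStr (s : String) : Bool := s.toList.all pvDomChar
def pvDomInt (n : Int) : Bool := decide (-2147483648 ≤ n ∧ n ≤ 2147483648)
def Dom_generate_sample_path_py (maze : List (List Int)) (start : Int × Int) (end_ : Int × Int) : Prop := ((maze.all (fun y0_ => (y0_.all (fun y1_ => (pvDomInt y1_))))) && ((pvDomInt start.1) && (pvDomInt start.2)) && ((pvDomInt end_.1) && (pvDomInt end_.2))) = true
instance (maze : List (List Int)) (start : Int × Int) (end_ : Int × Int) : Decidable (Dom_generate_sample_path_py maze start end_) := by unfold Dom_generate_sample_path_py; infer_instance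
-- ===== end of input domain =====

-- B replaces A's stateful while loop by a closed-form per-step position formula (objective: alternative decomposition, same cost).


-- ===== PORT A =====
-- while-loop of A: recursion justified by the length cap (path grows, breaks past 100)
def pvLoopA (end_ : Int × Int) (current : Int × Int) (path : List (Int × Int)) : List (Int × Int) :=
  if current ≠ end_ then
    let next_x := current.1 + (if end_.1 > current.1 then 1 else if end_.1 < current.1 then -1 else 0)
    let next_y := current.2 + (if end_.2 > current.2 then 1 else if end_.2 < current.2 then -1 else 0)
    let c := (next_x, next_y)
    let p := path ++ [c]
    if p.length > 100 then p else pvLoopA end_ c p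
  else path
termination_by 101 - path.length
decreasing_by simp only [p, c, List.length_append, List.length_cons, List.length_nil, gt_iff_lt, not_lt] at *; omega

def generate_sample_path_py (maze : List (List Int)) (start : Int × Int) (end_ : Int × Int) : List (Int × Int) :=
  pvLoopA end_ start [start]

-- ===== PORT B =====
def generate_sample_path_py_alt (maze : List (List Int)) (start : Int × Int) (end_ : Int × Int) : List (Int × Int) :=
  let dx := end_.1 - start.1
  let dy := end_.2 - start.2
  let sx : Int := if dx > 0 then 1 else if dx < 0 then -1 else 0
  let sy : Int := if dy > 0 then 1 else if dy < 0 then -1 else 0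
  let n : Nat := min (max dx.natAbs dy.natAbs) 100
  (List.range (n + 1)).map (fun (i : Nat) =>
    (start.1 + sx * min (i : Int) (dx.natAbs : Int),
     start.2 + sy * min (i : Int) (dy.natAbs : Int)))


-- ===== PRECONDITION & SPEC =====
def Spec_generate_sample_path_py (maze : List (List Int)) (start : Int × Int) (end_ : Int × Int) (out : List (Int × Int)) : Prop := out = generate_sample_path_py_alt maze start end_
instance (maze : List (List Int)) (start : Int × Int) (end_ : Int × Int) (out : List (Int × Int)) : Decidable (Spec_generate_sample_path_py maze start end_ out) := by unfold Spec_generate_sample_path_py; infer_instance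

-- ===== CLAIM (what is proved, stated in full; the proofs are below) =====
def Claim_equal_generate_sample_path_py : Prop := ∀ (maze : List (List Int)) (start : Int × Int) (end_ : Int × Int), Dom_generate_sample_path_py maze start end_ → Spec_generate_sample_path_py maze start end_ (generate_sample_path_py maze start end_)

-- ===== LEMMAS AND PROOFS =====

-- position on one axis after i steps of the straight-line walk
def pvPosAxis (s dx : Int) (i : Nat) : Int :=
  s + (if dx > 0 then 1 else if dx < 0 then -1 else 0) * min (i : Int) (dx.natAbs : Int)

def pvPos (start end_ : Int × Int) (i : Nat) : Int × Int :=
  (pvPosAxis start.1 (end_.1 - start.1) i, pvPosAxis start.2 (end_.2 - start.2) i)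

def pvD (start end_ : Int × Int) : Nat :=
  max (end_.1 - start.1).natAbs (end_.2 - start.2).natAbs

def pvN (start end_ : Int × Int) : Nat := min (pvD start end_) 100

theorem pvPosAxis_zero (s dx : Int) : pvPosAxis s dx 0 = s := by
  unfold pvPosAxis; split_ifs <;> omega

theorem pvPosAxis_eq_iff (s dx : Int) (i : Nat) :
    pvPosAxis s dx i = s + dx ↔ dx.natAbs ≤ i := by
  unfold pvPosAxis; split_ifs <;> omega

theorem pvPosAxis_step (s dx : Int) (i : Nat) :
    pvPosAxis s dx i +
      (if s + dx > pvPosAxis s dx i then 1 else if s + dx < pvPosAxis s dx i then -1 else 0)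
      = pvPosAxis s dx (i + 1) := by
  unfold pvPosAxis; split_ifs <;> omega

theorem pvPos_zero (start end_ : Int × Int) : pvPos start end_ 0 = start := by
  simp [pvPos, pvPosAxis_zero]

theorem pvPos_eq_end_iff (start end_ : Int × Int) (i : Nat) :
    pvPos start end_ i = end_ ↔ pvD start end_ ≤ i := by
  obtain ⟨a, b⟩ := start; obtain ⟨c, d⟩ := end_
  have h1 := pvPosAxis_eq_iff a (c - a) i
  have h2 := pvPosAxis_eq_iff b (d - b) i
  rw [show a + (c - a) = c by ring] at h1
  rw [show b + (d - b) = d by ring] at h2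
  simp only [pvPos, pvD, Prod.mk.injEq, h1, h2]
  omega

theorem pvPos_step (start end_ : Int × Int) (i : Nat) :
    ((pvPos start end_ i).1 +
       (if end_.1 > (pvPos start end_ i).1 then 1 else if end_.1 < (pvPos start end_ i).1 then -1 else 0),
     (pvPos start end_ i).2 +
       (if end_.2 > (pvPos start end_ i).2 then 1 else if end_.2 < (pvPos start end_ i).2 then -1 else 0))
      = pvPos start end_ (i + 1) := by
  obtain ⟨a, b⟩ := start; obtain ⟨c, d⟩ := end_
  have h1 := pvPosAxis_step a (c - a) i
  have h2 := pvPosAxis_step b (d - b) i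
  rw [show a + (c - a) = c by ring] at h1
  rw [show b + (d - b) = d by ring] at h2
  simp only [pvPos]
  exact Prod.ext h1 h2

theorem pvLoop_spec (start end_ : Int × Int) :
    ∀ k i : Nat, pvN start end_ - i ≤ k → i ≤ pvN start end_ →
      (pvD start end_ ≤ 100 ∨ i < pvN start end_) →
      pvLoopA end_ (pvPos start end_ i) ((List.range (i + 1)).map (pvPos start end_)) =
        (List.range (pvN start end_ + 1)).map (pvPos start end_) := by
  intro k
  induction k with
  | zero =>
      intro i hk hi h3
      have hdn : pvN start end_ = min (pvD start end_) 100 := rfl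
      have hieq : i = pvN start end_ := by omega
      have hend : pvPos start end_ i = end_ := by
        rw [pvPos_eq_end_iff]; omega
      subst hieq
      rw [pvLoopA]
      simp [hend]
  | succ k ih =>
      intro i hk hi h3
      have hdn : pvN start end_ = min (pvD start end_) 100 := rfl
      rw [pvLoopA]
      by_cases hend : pvPos start end_ i = end_
      · have hieq : i = pvN start end_ := by
          rw [pvPos_eq_end_iff] at hend; omega
        subst hieq
        simp [hend]
      · have hlt : i < pvD start end_ := by
          rw [pvPos_eq_end_iff] at hend; omega
        simp only [ne_eq, hend, not_false_eq_true, if_pos]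
        rw [pvPos_step start end_ i]
        have hpath : (List.range (i + 1)).map (pvPos start end_) ++ [pvPos start end_ (i + 1)]
            = (List.range (i + 2)).map (pvPos start end_) := by
          simp [List.range_succ, List.append_assoc]
        rw [hpath]
        have hlen : ((List.range (i + 2)).map (pvPos start end_)).length = i + 2 := by
          simp
        by_cases hbig : ((List.range (i + 2)).map (pvPos start end_)).length > 100
        · have hieq : i + 1 = pvN start end_ := by omega
          simp only [hbig, if_pos]
          rw [show i + 2 = pvN start end_ + 1 by omega]
        · simp only [hbig, if_neg, not_false_eq_true]
          exact ih (i + 1) (by omega) (by omega) (by omega)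

-- ===== VERDICT (by name: the statement is the Claim_ definition above) =====
theorem generate_sample_path_py_spec : Claim_equal_generate_sample_path_py := by
  intro maze start end_ _
  show generate_sample_path_py maze start end_ = generate_sample_path_py_alt maze start end_
  have halt : generate_sample_path_py_alt maze start end_
      = (List.range (pvN start end_ + 1)).map (pvPos start end_) := by
    unfold generate_sample_path_py_alt pvN pvD pvPos pvPosAxis; rfl
  have h0 : generate_sample_path_py maze start end_
      = pvLoopA end_ (pvPos start end_ 0) ((List.range 1).map (pvPos start end_)) := by
    unfold generate_sample_path_py
    rw [show ([start] : List (Int × Int)) = (List.range 1).map (pvPos start end_) by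
      simp [pvPos_zero], pvPos_zero]
  rw [halt, h0]
  exact pvLoop_spec start end_ (pvN start end_) 0 (by omega) (by omega)
    (by unfold pvN; omega)
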